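-- pv_equiv track=rewrite | github.com/kacperlavender/metoda-wegierska | redukcja.py | redukcja
-- ===== SOURCE A (Python) =====
-- def redukcja(macierz):
--     suma_redukcji = 0
--
--     # redukcja wierszy
--     for i in range(len(macierz)):
--         min_wiersz = min(macierz[i])
--         suma_redukcji += min_wiersz
--
--         for j in range(len(macierz[i])):
--             macierz[i][j] -= min_wiersz
--
--     # redukcja kolumn
--     for j in range(len(macierz[0])):
--         min_kol = min(macierz[i][j] for i in range(len(macierz)))
--         suma_redukcji += min_kol
--
--         for i in range(len(macierz)):
--             macierz[i][j] -= min_kol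
--
--     return suma_redukcji
-- ===== SOURCE B (Python) =====
-- def redukcja(macierz):
--     # Single online pass over the rows: accumulate row minima into `total`
--     # and fold each row-reduced row into a running vector of column bests,
--     # so no second column pass and no mutation of the argument.
--     total = 0
--     col_best = None
--     for row in macierz:
--         m = min(row)
--         total += m
--         shifted = [v - m for v in row]
--         if col_best is None:
--             col_best = shifted
--         else:
--             col_best = [x if x < y else y for x, y in zip(col_best, shifted)]
--     return total + sum(col_best)
-- ===== Notes on version B (the rewrite author's own statement) =====
-- stated objective: faster
-- what changed: B replaces A's two staged mutation passes (reduce every row in place, then rescan and reduce each column in place) with one online pass over the rows that folds each row-reduced row into a running vector of column bests, so the matrix is traversed once, never mutated and never indexed column-wise; A mutates its argument, B does not (the claim is about the return value).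
import Mathlib
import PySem

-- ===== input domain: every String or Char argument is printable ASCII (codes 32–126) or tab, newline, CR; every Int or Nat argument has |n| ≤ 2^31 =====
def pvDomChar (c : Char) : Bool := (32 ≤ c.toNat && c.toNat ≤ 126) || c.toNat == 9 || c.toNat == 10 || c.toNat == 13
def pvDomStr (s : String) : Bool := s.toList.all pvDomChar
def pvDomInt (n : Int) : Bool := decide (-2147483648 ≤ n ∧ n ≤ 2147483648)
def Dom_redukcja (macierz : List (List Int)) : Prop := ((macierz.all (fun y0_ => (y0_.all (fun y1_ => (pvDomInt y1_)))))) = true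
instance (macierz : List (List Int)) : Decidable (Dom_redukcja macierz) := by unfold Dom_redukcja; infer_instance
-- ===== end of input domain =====

-- B replaces A's two staged mutation passes by one online pass over the rows that
-- folds each row-reduced row into a running vector of column bests; A mutates its
-- argument in place (the equivalence proved here is about the RETURN value only).

-- ===== PORT A =====
-- Python min(xs) on a nonempty list (Pre_ keeps every row nonempty)
def pyMin : List Int → Int
  | [] => 0
  | h :: t => t.foldl min h

-- first Python loop: add each row's min and subtract it from the row (in-place
-- mutation becomes rebuilding the matrix)
def rowLoopA : List (List Int) → Int × List (List Int)
  | [] => (0, [])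
  | r :: rs =>
      let mw := pyMin r
      let rest := rowLoopA rs
      (mw + rest.1, r.map (· - mw) :: rest.2)

-- second Python loop over j in range(len(macierz[0])): column min, add, subtract
-- (list indexing macierz[i][j] is in range under Pre_, so getD is exact there)
def colLoopA : List Nat → List (List Int) → Int → Int
  | [], _, s => s
  | j :: js, mat, s =>
      let ck := pyMin (mat.map (fun r => r.getD j 0))
      colLoopA js (mat.map (fun r => r.mapIdx (fun k v => if k = j then v - ck else v))) (s + ck)

def redukcja (macierz : List (List Int)) : Int :=
  let p := rowLoopA macierz
  colLoopA (List.range (macierz.headD []).length) p.2 p.1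

-- ===== PORT B =====
-- one iteration of B's single loop: state = (total, running column bests)
def stepB (st : Int × Option (List Int)) (row : List Int) : Int × Option (List Int) :=
  let m := pyMin row
  let shifted := row.map (· - m)
  (st.1 + m,
   some (match st.2 with
         | none => shifted
         | some cb => (cb.zip shifted).map (fun p => if p.1 < p.2 then p.1 else p.2)))

def redukcja_alt (macierz : List (List Int)) : Int :=
  let st := macierz.foldl stepB (0, none)
  st.1 + (st.2.getD []).sum

-- ===== PRECONDITION & SPEC =====
-- Pre_ is exactly where A returns: A raises IndexError/ValueError on the empty
-- matrix, on any empty row, and on any row shorter than the first row.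
def Pre_redukcja (macierz : List (List Int)) : Prop :=
  macierz ≠ [] ∧ ∀ r ∈ macierz, r ≠ [] ∧ (macierz.headD []).length ≤ r.length
instance (macierz : List (List Int)) : Decidable (Pre_redukcja macierz) := by
  unfold Pre_redukcja; infer_instance
def pvWitness_redukcja : List (List Int) := [[1, 2], [3, 0]]

def Spec_redukcja (macierz : List (List Int)) (out : Int) : Prop := out = redukcja_alt macierz
instance (macierz : List (List Int)) (out : Int) : Decidable (Spec_redukcja macierz out) := by unfold Spec_redukcja; infer_instance

-- ===== CLAIM (what is proved, stated in full; the proofs are below) =====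
def Claim_equal_redukcja : Prop := ∀ (macierz : List (List Int)), Dom_redukcja macierz → Pre_redukcja macierz → Spec_redukcja macierz (redukcja macierz)

-- ===== LEMMAS AND PROOFS =====

theorem rowLoopA_eq (m : List (List Int)) :
    rowLoopA m = ((m.map pyMin).sum, m.map (fun r => r.map (· - pyMin r))) := by
  induction m with
  | nil => simp [rowLoopA]
  | cons r rs ih => simp [rowLoopA, ih]

theorem getD_mapIdx_ne (r : List Int) (c : Int) (j j' : Nat) (h : j ≠ j') :
    ((r.mapIdx (fun k v => if k = j then v - c else v)).getD j' 0) = r.getD j' 0 := by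
  simp only [List.getD_eq_getElem?_getD, List.getElem?_mapIdx]
  cases r[j']? with
  | none => rfl
  | some v => simp [Ne.symm h]

theorem colLoopA_sum (js : List Nat) (mat : List (List Int)) (s : Int) (h : js.Nodup) :
    colLoopA js mat s = s + (js.map (fun j => pyMin (mat.map (fun r => r.getD j 0)))).sum := by
  induction js generalizing mat s with
  | nil => simp [colLoopA]
  | cons j rest ih =>
      simp only [List.nodup_cons] at h
      rw [colLoopA, ih _ _ h.2]
      have : ∀ j' ∈ rest,
          pyMin ((mat.map (fun r => r.mapIdx (fun k v =>
              if k = j then v - pyMin (mat.map (fun r => r.getD j 0)) else v))).map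
            (fun r => r.getD j' 0))
          = pyMin (mat.map (fun r => r.getD j' 0)) := by
        intro j' hj'
        have hne : j ≠ j' := fun e => h.1 (e ▸ hj')
        congr 1
        simp only [List.map_map]
        exact List.map_congr_left (fun r _ => getD_mapIdx_ne r _ j j' hne)
      rw [List.map_congr_left this]
      simp only [List.map_cons, List.sum_cons]
      ring

theorem min_if (a b : Int) : (if a < b then a else b) = min a b := by
  rw [min_def]; split_ifs <;> omega

-- the running-column-bests invariant of B's single loop
theorem pyMin_cons (x : Int) (l : List Int) : pyMin (x :: l) = l.foldl min x := rfl

theorem foldB (rows : List (List Int)) (t : Int) (cb : List Int)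
    (h : ∀ r ∈ rows, cb.length ≤ r.length) :
    rows.foldl stepB (t, some cb)
      = (t + (rows.map pyMin).sum,
         some ((List.range cb.length).map
           (fun j => (rows.map (fun r => r.getD j 0 - pyMin r)).foldl min (cb.getD j 0)))) := by
  induction rows generalizing t cb with
  | nil =>
      simp only [List.foldl_nil, List.map_nil, List.sum_nil, add_zero]
      congr 2
      apply List.ext_getElem (by simp)
      intro j h1 h2
      simp only [List.getElem_map, List.getElem_range, List.getD_eq_getElem?_getD]
      rw [List.getElem?_eq_getElem (by simpa using h2)]
      rfl
  | cons r rs ih =>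
      have hr : cb.length ≤ r.length := h r (by simp)
      have hzlen : ((cb.zip (r.map (· - pyMin r))).map
          (fun p => if p.1 < p.2 then p.1 else p.2)).length = cb.length := by
        simp [Nat.min_eq_left (by simpa using hr)]
      have hget : ∀ j < cb.length,
          ((cb.zip (r.map (· - pyMin r))).map (fun p => if p.1 < p.2 then p.1 else p.2)).getD j 0
            = min (cb.getD j 0) (r.getD j 0 - pyMin r) := by
        intro j hj
        have hjr : j < r.length := lt_of_lt_of_le hj hr
        have hjz : j < (cb.zip (r.map (· - pyMin r))).length := by
          simp [Nat.min_eq_left (by simpa using hr)]; exact hj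
        simp only [List.getD_eq_getElem?_getD, List.getElem?_map]
        rw [List.getElem?_eq_getElem hjz, List.getElem_zip]
        simp [List.getElem?_eq_getElem hj, List.getElem?_eq_getElem hjr, min_if]
      simp only [List.foldl_cons, stepB]
      rw [ih _ _ (by intro r' hr'; rw [hzlen]; exact h r' (by simp [hr']))]
      rw [hzlen, Prod.mk.injEq]
      refine ⟨by simp only [List.map_cons, List.sum_cons]; ring, ?_⟩
      congr 1
      apply List.map_congr_left
      intro j hj
      rw [List.mem_range] at hj
      rw [hget j hj]
      simp [List.foldl_cons]

-- ===== VERDICT (by name: the statement is the Claim_ definition above) =====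
theorem redukcja_spec : Claim_equal_redukcja := by
  intro m _ hpre
  obtain ⟨hne, hrows⟩ := hpre
  obtain ⟨r0, rs, rfl⟩ := List.exists_cons_of_ne_nil hne
  unfold Spec_redukcja redukcja redukcja_alt
  rw [rowLoopA_eq]
  simp only [List.headD_cons]
  rw [colLoopA_sum _ _ _ (List.nodup_range)]
  -- B's fold
  have hlen0 : ∀ r ∈ rs, (r0.map (· - pyMin r0)).length ≤ r.length := by
    intro r hr
    simpa using (hrows r (by simp [hr])).2
  rw [List.foldl_cons]
  show _ = (rs.foldl stepB (stepB (0, none) r0)).1 +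
      ((rs.foldl stepB (stepB (0, none) r0)).2.getD []).sum
  have hstep0 : stepB (0, none) r0 = (pyMin r0, some (r0.map (· - pyMin r0))) := by
    simp [stepB]
  rw [hstep0, foldB rs (pyMin r0) _ hlen0]
  simp only [Option.getD_some, List.length_map]
  -- reconcile the two summations term by term
  have hcols : ∀ j ∈ List.range r0.length,
      (rs.map (fun r => r.getD j 0 - pyMin r)).foldl min ((r0.map (· - pyMin r0)).getD j 0)
        = pyMin (((r0 :: rs).map (fun r => r.map (· - pyMin r))).map (fun r => r.getD j 0)) := by
    intro j hj
    rw [List.mem_range] at hj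
    rw [List.map_cons, List.map_cons, pyMin_cons, List.map_map]
    congr 1
    apply List.map_congr_left
    intro r hr
    have hjr : j < r.length := lt_of_lt_of_le hj (hrows r (by simp [hr])).2
    simp [Function.comp, List.getD_eq_getElem?_getD, List.getElem?_map,
      List.getElem?_eq_getElem hjr]
  rw [List.map_congr_left hcols]
  simp only [List.map_cons, List.sum_cons]
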